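-- pv_equiv track=rewrite | github.com/Rrvathi/Python | day1.py | char_counts_ordered
-- ===== SOURCE A (Python) =====
-- def char_counts_ordered(s):
--     counts = {}
--     order = []
--     for ch in s:
--         if ch == ' ':
--             continue
--         if ch not in counts:
--             order.append(ch)
--             counts[ch] = 1
--         else:
--             counts[ch] += 1
--
--     return ' '.join(f"{ch}{counts[ch]}" for ch in order)
-- ===== SOURCE B (Python) =====
-- def char_counts_ordered(s):
--     def go(t):
--         if not t:
--             return []
--         c = t[0]
--         rest = [x for x in t if x != c]
--         return [f"{c}{len(t) - len(rest)}"] + go(rest)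
--     return ' '.join(go([ch for ch in s if ch != ' ']))
-- ===== Notes on version B (the rewrite author's own statement) =====
-- stated objective: alternative
-- what changed: Replaces the dict+order-list counting loop by a successive-removal recursion: repeatedly take the first remaining character, derive its count from the length drop when all its copies are filtered out, and recurse on the shrunken list; no counting dictionary is maintained at all.
import Mathlib
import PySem

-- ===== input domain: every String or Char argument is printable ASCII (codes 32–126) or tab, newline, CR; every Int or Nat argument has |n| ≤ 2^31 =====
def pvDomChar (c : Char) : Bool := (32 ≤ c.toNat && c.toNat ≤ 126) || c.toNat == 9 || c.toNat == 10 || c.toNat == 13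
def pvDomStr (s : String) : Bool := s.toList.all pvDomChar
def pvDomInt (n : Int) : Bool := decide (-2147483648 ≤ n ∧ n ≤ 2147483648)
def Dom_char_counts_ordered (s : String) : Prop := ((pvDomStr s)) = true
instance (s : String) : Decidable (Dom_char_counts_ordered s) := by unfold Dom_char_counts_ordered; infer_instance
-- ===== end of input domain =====

-- B replaces A's dict+order-list loop by a successive-removal recursion (alternative decomposition, not faster).

-- ===== PORT A =====
-- the loop body: skip ' ', else first-occurrence bookkeeping (dict of counts + order list)
def pvStepA (p : PySem.Dict Char Int × List Char) (ch : Char) :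
    PySem.Dict Char Int × List Char :=
  if ch == ' ' then p
  else if !(p.1.contains ch) then (p.1.insert ch 1, p.2 ++ [ch])
  else (p.1.insert ch (p.1.getD ch 0 + 1), p.2)

def char_counts_ordered (s : String) : String :=
  let st := s.toList.foldl pvStepA (PySem.Dict.empty, [])
  -- ' '.join(f"{ch}{counts[ch]}" for ch in order); counts[ch] is always present, ported as getD
  String.ofList (PySem.Chars.join [' '] (st.2.map (fun ch => ch :: PySem.Int.toChars (st.1.getD ch 0))))

-- ===== PORT B =====
-- go(t): take the first remaining char c, count it via the length drop after removing all its
-- copies, emit f"{c}{count}", recurse on the remainder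
def pvGoB : List Char → List (List Char)
  | [] => []
  | c :: t' =>
      (c :: PySem.Int.toChars (((c :: t').length : Int)
            - (((c :: t').filter (fun x => !(x == c))).length : Int)))
        :: pvGoB ((c :: t').filter (fun x => !(x == c)))
  termination_by t => t.length
  decreasing_by
    simp only [List.filter_cons, beq_self_eq_true, Bool.not_true, Bool.false_eq_true, if_false]
    exact Nat.lt_succ_of_le (List.length_filter_le _ _)

def char_counts_ordered_alt (s : String) : String :=
  String.ofList (PySem.Chars.join [' '] (pvGoB (s.toList.filter (fun ch => !(ch == ' ')))))

-- ===== PRECONDITION & SPEC =====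
def Spec_char_counts_ordered (s : String) (out : String) : Prop := out = char_counts_ordered_alt s
instance (s : String) (out : String) : Decidable (Spec_char_counts_ordered s out) := by unfold Spec_char_counts_ordered; infer_instance

-- ===== CLAIM (what is proved, stated in full; the proofs are below) =====
def Claim_equal_char_counts_ordered : Prop := ∀ (s : String), Dom_char_counts_ordered s → Spec_char_counts_ordered s (char_counts_ordered s)

-- ===== LEMMAS AND PROOFS =====

-- A's loop ignores spaces: it is the counting step over the filtered list
lemma pvStepA_eq_filter (l : List Char) (p : PySem.Dict Char Int × List Char) :
    l.foldl pvStepA p =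
      (l.filter (fun ch => !(ch == ' '))).foldl
        (fun p ch => if !(p.1.contains ch) then (p.1.insert ch 1, p.2 ++ [ch])
                     else (p.1.insert ch (p.1.getD ch 0 + 1), p.2)) p := by
  induction l generalizing p with
  | nil => rfl
  | cons ch l ih =>
      by_cases h : ch = ' '
      · simp [pvStepA, h, ih]
      · simp [pvStepA, h, ih]

-- invariant: if order = keys and keys are nodup, the loop is the counter loop paired with its keys
lemma pvLoop_counter (l : List Char) (d : PySem.Dict Char Int) (ord : List Char)
    (hord : ord = d.keys) (hnd : d.keys.Nodup) :
    l.foldl (fun p ch => if !(p.1.contains ch) then (p.1.insert ch 1, p.2 ++ [ch])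
                         else (p.1.insert ch (p.1.getD ch 0 + 1), p.2)) (d, ord) =
      (l.foldl (fun d ch => d.insert ch (d.getD ch 0 + 1)) d,
       (l.foldl (fun d ch => d.insert ch (d.getD ch 0 + 1)) d).keys) := by
  induction l generalizing d ord with
  | nil => simpa using hord
  | cons ch l ih =>
      by_cases h : d.contains ch
      · have hk : (d.insert ch (d.getD ch 0 + 1)).keys = d.keys :=
          PySem.Dict.keys_insert_of_contains d (d.getD ch 0 + 1) h
        simp only [List.foldl_cons, h, Bool.not_true, Bool.false_eq_true, if_false]
        rw [ih _ _ (by rw [hord, hk]) (by rw [hk]; exact hnd)]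
      · have h' : d.contains ch = false := by simpa using h
        have hget : d.getD ch 0 = 0 := by
          have : d.get? ch = none := by
            rw [PySem.Dict.get?_eq_none_iff_contains]; exact h'
          simp [PySem.Dict.getD, this]
        have h1 : d.insert ch 1 = d.insert ch (d.getD ch 0 + 1) := by rw [hget]; norm_num
        have hk : (d.insert ch (d.getD ch 0 + 1)).keys = d.keys ++ [ch] := by
          rw [← h1]
          exact PySem.Dict.keys_insert_of_not_contains d 1 h'
        simp only [List.foldl_cons, h', Bool.not_false, if_true]
        rw [h1, ih _ _ (by rw [hord, hk]) ?_]
        rw [hk]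
        refine List.Nodup.append hnd (List.nodup_singleton ch) ?_
        intro a ha hb
        simp at hb; subst hb
        rw [← PySem.Dict.contains_iff_mem_keys] at ha
        simp [h'] at ha

-- adding an element already present is a no-op, so filtering its copies out of the tail is invisible
lemma pvFoldAdd_filter (c : Char) (l : List Char) (s : List Char) (hc : c ∈ s) :
    l.foldl PySem.Set.add s = (l.filter (fun x => !(x == c))).foldl PySem.Set.add s := by
  induction l generalizing s with
  | nil => rfl
  | cons x l ih =>
      by_cases h : x = c
      · subst h
        have : PySem.Set.add s x = s := by simp [PySem.Set.add, PySem.Set.contains, hc]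
        simp [this, ih s hc]
      · have hc' : c ∈ PySem.Set.add s x := by
          simp [PySem.Set.add]; split <;> simp [hc]
        simp [h, ih _ hc']

-- a head element absent from the rest stays in front of the accumulated set
lemma pvFoldAdd_cons (c : Char) (l : List Char) (s : List Char) (hc : c ∉ l) :
    l.foldl PySem.Set.add (c :: s) = c :: l.foldl PySem.Set.add s := by
  induction l generalizing s with
  | nil => rfl
  | cons x l ih =>
      have hx : x ≠ c := fun h => hc (h ▸ List.mem_cons_self)
      have hstep : PySem.Set.add (c :: s) x = c :: PySem.Set.add s x := by
        simp [PySem.Set.add, PySem.Set.contains, hx]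
        split <;> simp
      rw [List.foldl_cons, hstep, ih _ (fun h => hc (List.mem_cons_of_mem _ h)), List.foldl_cons]

-- dedup takes the head, then dedups the tail with the head's copies removed
lemma pvDedup_cons (c : Char) (t : List Char) :
    PySem.List.dedup (c :: t) = c :: PySem.List.dedup (t.filter (fun x => !(x == c))) := by
  rw [PySem.List.dedup_eq_ofList, PySem.List.dedup_eq_ofList, PySem.Set.ofList_eq_foldl,
      PySem.Set.ofList_eq_foldl, List.foldl_cons]
  have h0 : PySem.Set.add [] c = [c] := rfl
  rw [h0, pvFoldAdd_filter c t [c] (by simp)]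
  exact pvFoldAdd_cons c _ [] (by simp)

-- filtering a character's copies out drops the length by its count (no named Mathlib lemma found)
lemma pvFilterLen (c : Char) (l : List Char) :
    (l.filter (fun x => !(x == c))).length + l.count c = l.length := by
  induction l with
  | nil => rfl
  | cons x l ih =>
      by_cases h : x = c <;> simp [h] <;> omega

-- B's recursion computes each character's count over the original (filtered) list
lemma pvGoB_eq (t : List Char) :
    pvGoB t = (PySem.List.dedup t).map
      (fun ch => ch :: PySem.Int.toChars ((t.count ch : Int))) := by
  induction t using pvGoB.induct with
  | case1 => simp [pvGoB]
  | case2 c t' ih =>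
      rw [pvGoB, pvDedup_cons, List.map_cons, ih]
      have hrest : (c :: t').filter (fun x => !(x == c)) = t'.filter (fun x => !(x == c)) := by
        simp
      congr 1
      · -- head: length drop = count of c
        congr 1
        congr 1
        have h1 := pvFilterLen c (c :: t')
        omega
      · -- tail: counts agree on characters surviving the filter
        rw [hrest]
        refine List.map_congr_left ?_
        intro ch hch
        have hch' : ch ∈ t'.filter (fun x => !(x == c)) := by
          simpa [PySem.List.mem_dedup] using hch
        have hne : ch ≠ c := by
          have := List.of_mem_filter hch'
          simpa using this
        have hne' : ¬ (c = ch) := fun h => hne h.symm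
        have hcount : (t'.filter (fun x => !(x == c))).count ch = (c :: t').count ch := by
          rw [List.count_filter (by simpa using hne), List.count_cons]
          simp [hne']
        rw [hcount]

-- ===== VERDICT (by name: the statement is the Claim_ definition above) =====
theorem char_counts_ordered_spec : Claim_equal_char_counts_ordered := by
  intro s _
  unfold Spec_char_counts_ordered char_counts_ordered char_counts_ordered_alt
  rw [pvStepA_eq_filter,
      pvLoop_counter _ _ _ (by simp [PySem.Dict.keys_empty]) (by simp [PySem.Dict.keys_empty]),
      PySem.Dict.foldl_insert_getD_add_one_eq_counter, pvGoB_eq]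
  simp only [PySem.Dict.keys_counter, ← PySem.List.dedup_eq_ofList,
    PySem.Dict.getD_counter]
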